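-- pv_equiv track=rewrite | github.com/josegarciaclm95/PruebasPython | PruebasPython/PruebasPython.py | lookForRepeated
-- ===== SOURCE A (Python) =====
-- def lookForRepeated(numList, occurrences):
--     occurFound = []
--     found = 0
--     aux = numList[0]
--     for digit in numList:
--         if digit == aux:
--             found += 1
--             if found == occurrences :
--                 occurFound.append(aux)
--                 found = 0
--         else:
--             aux = digit
--             found = 1
--     return occurFound
-- ===== SOURCE B (Python) =====
-- def lookForRepeated(numList, occurrences):
--     # One pass: run-length encode the list into maximal runs of equal values.
--     runs = []
--     for x in numList:
--         if runs and runs[-1][0] == x: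
--             runs[-1][1] += 1
--         else:
--             runs.append([x, 1])
--     # Each run of length `run` contributes its value floor(run/occurrences) times.
--     result = []
--     for v, run in runs:
--         result += [v] * (run // occurrences)
--     return result
-- ===== Notes on version B (the rewrite author's own statement) =====
-- stated objective: alternative
-- what changed: B run-length encodes the list in one pass and then emits each run's value floor(run_length/occurrences) times, replacing A's element-wise counter-and-reset state machine.
-- intended difference: When occurrences == 1 and the list is not all-equal, A returns only the first run (its else-branch sets found=1 without re-checking found==occurrences, so later runs never trigger an append), while B returns every element once, which is the intended 'every 1 occurrence' answer. — e.g. on lookForRepeated([1, 2], 1): A returns [1], B returns [1, 2]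
-- outside the precondition, e.g. on lookForRepeated([1, 1], 0): A returns [], B raises ZeroDivisionError
import Mathlib
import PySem

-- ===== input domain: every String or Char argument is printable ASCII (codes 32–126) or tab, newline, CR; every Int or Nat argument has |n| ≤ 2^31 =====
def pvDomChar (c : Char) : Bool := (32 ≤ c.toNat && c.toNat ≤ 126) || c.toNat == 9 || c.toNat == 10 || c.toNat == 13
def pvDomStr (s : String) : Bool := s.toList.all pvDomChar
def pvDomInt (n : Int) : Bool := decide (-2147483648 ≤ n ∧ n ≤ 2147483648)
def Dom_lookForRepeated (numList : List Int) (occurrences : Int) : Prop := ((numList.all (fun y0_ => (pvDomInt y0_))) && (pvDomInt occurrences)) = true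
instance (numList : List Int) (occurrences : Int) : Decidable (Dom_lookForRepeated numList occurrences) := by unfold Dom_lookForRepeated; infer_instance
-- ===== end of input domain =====

-- B replaces A's element-wise counter-and-reset state machine by a decomposition into
-- maximal runs, emitting each run's value floor(run/occurrences) times (objective: alternative).
-- On occurrences = 1 with a non-uniform list A drops every run after the first (stale check);
-- B returns the intended value there (see D_ below).

-- ===== PORT A =====
-- state: (occurFound, found, aux); [] case is where Python raises IndexError (excluded by Pre_)
def lookForRepeated (numList : List Int) (occurrences : Int) : List Int :=
  match numList with
  | [] => []
  | a0 :: _ =>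
    (numList.foldl (fun st digit =>
        if digit = st.2.2 then
          if st.2.1 + 1 = occurrences then (st.1 ++ [st.2.2], (0 : Int), st.2.2)
          else (st.1, st.2.1 + 1, st.2.2)
        else (st.1, (1 : Int), digit)) (([] : List Int), (0 : Int), a0)).1

-- ===== PORT B =====
-- first loop of Source B: run-length encoding step ('runs and runs[-1][0] == x' → getLast?;
-- 'runs[-1][1] += 1' → replace the last pair; 'runs.append([x, 1])' → ++ [(x, 1)])
def rleStep (runs : List (Int × Int)) (x : Int) : List (Int × Int) :=
  match runs.getLast? with
  | some (v, c) => if v = x then runs.dropLast ++ [(v, c + 1)] else runs ++ [(x, 1)]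
  | none => [(x, 1)]

-- second loop of Source B: result += [v] * (run // occurrences); a negative count gives []
def lookForRepeated_alt (numList : List Int) (occurrences : Int) : List Int :=
  (numList.foldl rleStep []).foldl
    (fun acc p => acc ++ List.replicate (PySem.Int.floordiv p.2 occurrences).toNat p.1) []

-- ===== PRECONDITION & SPEC =====
-- Pre_ excludes the empty list, where A raises IndexError (numList[0]), and occurrences = 0,
-- where A returns [] but B's run_length // occurrences raises ZeroDivisionError.
def Pre_lookForRepeated (numList : List Int) (occurrences : Int) : Prop :=
  numList ≠ [] ∧ occurrences ≠ 0
instance (numList : List Int) (occurrences : Int) : Decidable (Pre_lookForRepeated numList occurrences) := by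
  unfold Pre_lookForRepeated; infer_instance

def pvWitness_lookForRepeated : List Int × Int := ([1, 1, 2, 2, 2], 2)

-- When occurrences = 1 and the list is not all-equal, A returns only the first run (its
-- else-branch never re-checks found == occurrences), while B returns every element once,
-- the intended answer for "repeated every 1 occurrence".
def D_lookForRepeated (numList : List Int) (occurrences : Int) : Prop :=
  occurrences = 1 ∧ ∃ x ∈ numList, x ≠ numList.headD 0
instance (numList : List Int) (occurrences : Int) : Decidable (D_lookForRepeated numList occurrences) := by
  unfold D_lookForRepeated; infer_instance

def Spec_lookForRepeated (numList : List Int) (occurrences : Int) (out : List Int) : Prop :=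
  ¬ D_lookForRepeated numList occurrences → out = lookForRepeated_alt numList occurrences
instance (numList : List Int) (occurrences : Int) (out : List Int) : Decidable (Spec_lookForRepeated numList occurrences out) := by
  unfold Spec_lookForRepeated; infer_instance

def pvDiffWitness_lookForRepeated : List Int × Int := ([1, 2], 1)
def pvDiffWitnessOut_lookForRepeated : (List Int) × (List Int) := ([1], [1, 2])

-- ===== CLAIM (what is proved, stated in full; the proofs are below) =====
def Claim_unchanged_lookForRepeated : Prop := ∀ (numList : List Int) (occurrences : Int), Dom_lookForRepeated numList occurrences → Pre_lookForRepeated numList occurrences → Spec_lookForRepeated numList occurrences (lookForRepeated numList occurrences)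
def Claim_changed_lookForRepeated : Prop := Dom_lookForRepeated (pvDiffWitness_lookForRepeated.1) (pvDiffWitness_lookForRepeated.2) ∧ Pre_lookForRepeated (pvDiffWitness_lookForRepeated.1) (pvDiffWitness_lookForRepeated.2) ∧ D_lookForRepeated (pvDiffWitness_lookForRepeated.1) (pvDiffWitness_lookForRepeated.2) ∧ lookForRepeated (pvDiffWitness_lookForRepeated.1) (pvDiffWitness_lookForRepeated.2) = pvDiffWitnessOut_lookForRepeated.1 ∧ lookForRepeated_alt (pvDiffWitness_lookForRepeated.1) (pvDiffWitness_lookForRepeated.2) = pvDiffWitnessOut_lookForRepeated.2 ∧ pvDiffWitnessOut_lookForRepeated.1 ≠ pvDiffWitnessOut_lookForRepeated.2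
def Claim_exact_lookForRepeated : Prop := ∀ (numList : List Int) (occurrences : Int), Dom_lookForRepeated numList occurrences → Pre_lookForRepeated numList occurrences → D_lookForRepeated numList occurrences → lookForRepeated numList occurrences ≠ lookForRepeated_alt numList occurrences

-- ===== LEMMAS AND PROOFS =====

-- proof-side helpers: maximal-run decomposition
def countRun (v : Int) : List Int → Int × List Int
  | [] => (0, [])
  | x :: xs => if x = v then ((countRun v xs).1 + 1, (countRun v xs).2) else (0, x :: xs)

theorem countRun_len_le (v : Int) (xs : List Int) : (countRun v xs).2.length ≤ xs.length := by
  induction xs with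
  | nil => simp [countRun]
  | cons x xs ih => by_cases h : x = v <;> simp [countRun, h] <;> omega

def altLoop (occurrences : Int) : List Int → List Int
  | [] => []
  | v :: rest0 =>
    let p := countRun v rest0
    List.replicate (PySem.Int.floordiv (p.1 + 1) occurrences).toNat v ++ altLoop occurrences p.2
termination_by xs => xs.length
decreasing_by simpa using Nat.lt_succ_of_le (countRun_len_le v rest0)

def runsOf : List Int → List (Int × Int)
  | [] => []
  | v :: rest0 =>
    let p := countRun v rest0
    (v, p.1 + 1) :: runsOf p.2
termination_by xs => xs.length
decreasing_by simpa using Nat.lt_succ_of_le (countRun_len_le v rest0)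


-- A's loop, abstracted from the accumulator: the values A appends from state (found, aux) on xs
def gA (occurrences found aux : Int) : List Int → List Int
  | [] => []
  | d :: xs =>
    if d = aux then
      (if found + 1 = occurrences then aux :: gA occurrences 0 aux xs
       else gA occurrences (found + 1) aux xs)
    else gA occurrences 1 d xs

theorem foldA_eq_gA (occurrences : Int) (xs : List Int) : ∀ (acc : List Int) (found aux : Int),
    (xs.foldl (fun st digit =>
        if digit = st.2.2 then
          if st.2.1 + 1 = occurrences then (st.1 ++ [st.2.2], (0 : Int), st.2.2)
          else (st.1, st.2.1 + 1, st.2.2)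
        else (st.1, (1 : Int), digit)) (acc, found, aux)).1
      = acc ++ gA occurrences found aux xs := by
  induction xs with
  | nil => intro acc found aux; simp [gA]
  | cons d xs ih =>
    intro acc found aux
    by_cases hd : d = aux
    · by_cases hf : found + 1 = occurrences
      · simp [gA, hd, hf, ih]
      · simp [gA, hd, hf, ih]
    · simp [gA, hd, ih]

theorem countRun_nonneg (v : Int) (xs : List Int) : 0 ≤ (countRun v xs).1 := by
  induction xs with
  | nil => simp [countRun]
  | cons x xs ih => by_cases h : x = v <;> simp [countRun, h] <;> omega

theorem countRun_cons_self (v : Int) (xs : List Int) :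
    countRun v (v :: xs) = ((countRun v xs).1 + 1, (countRun v xs).2) := by
  simp [countRun]

theorem countRun_cons_ne (v x : Int) (xs : List Int) (h : x ≠ v) :
    countRun v (x :: xs) = (0, x :: xs) := by
  simp [countRun, h]

theorem countRun_decomp (v : Int) (xs : List Int) :
    List.replicate (countRun v xs).1.toNat v ++ (countRun v xs).2 = xs := by
  induction xs with
  | nil => simp [countRun]
  | cons x xs ih =>
    by_cases h : x = v
    · have h0 := countRun_nonneg v xs
      subst h
      rw [countRun_cons_self]
      have h1 : ((countRun x xs).1 + 1).toNat = (countRun x xs).1.toNat + 1 := by omega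
      simp only [h1, List.replicate_succ, List.cons_append, ih]
    · simp [countRun, h]

theorem countRun_mem (v : Int) (xs : List Int) : ∀ y ∈ (countRun v xs).2, y ∈ xs := by
  induction xs with
  | nil => simp [countRun]
  | cons x xs ih =>
    by_cases h : x = v
    · simp only [countRun, h, if_pos rfl]
      intro y hy; exact List.mem_cons_of_mem _ (ih y hy)
    · simp [countRun, h]

theorem countRun_head_ne (v : Int) (xs : List Int) :
    (countRun v xs).2 = [] ∨ ∃ h t, (countRun v xs).2 = h :: t ∧ h ≠ v := by
  induction xs with
  | nil => simp [countRun]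
  | cons x xs ih =>
    by_cases h : x = v
    · simpa [countRun, h] using ih
    · exact Or.inr ⟨x, xs, by simp [countRun, h], h⟩

-- floor division facts
theorem fdiv_small (found occurrences : Int) (h0 : 0 ≤ found) (h1 : found < occurrences) :
    PySem.Int.floordiv found occurrences = 0 := by
  have hpos : 0 < occurrences := lt_of_le_of_lt h0 h1
  rw [PySem.Int.floordiv_eq_ediv_of_pos hpos]
  exact Int.ediv_eq_zero_of_lt h0 h1

theorem fdiv_add_self (c occurrences : Int) (hc : 0 ≤ c) (hpos : 0 < occurrences) :
    PySem.Int.floordiv (occurrences + c) occurrences = 1 + PySem.Int.floordiv c occurrences := by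
  rw [PySem.Int.floordiv_eq_ediv_of_pos hpos, PySem.Int.floordiv_eq_ediv_of_pos hpos]
  have h1 : occurrences + c = c + 1 * occurrences := by ring
  rw [h1, Int.add_mul_ediv_right c 1 (by omega : occurrences ≠ 0)]
  ring

theorem fdiv_neg_toNat (a b : Int) (ha : 1 ≤ a) (hb : b ≤ -1) :
    (PySem.Int.floordiv a b).toNat = 0 := by
  have h := PySem.Int.floordiv_mul_add_mod a b
  have hmod := PySem.Int.mod_neg_bounds a (b := b) (by omega)
  -- floordiv * b = a - mod ≥ 1, with b ≤ -1 forces floordiv < 0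
  have h1 : PySem.Int.floordiv a b * b ≥ 1 := by omega
  have h2 : PySem.Int.floordiv a b < 0 := by nlinarith
  omega

theorem fdiv_nonneg' (a b : Int) (ha : 0 ≤ a) (hb : 0 < b) :
    0 ≤ PySem.Int.floordiv a b := by
  rw [PySem.Int.floordiv_eq_ediv_of_pos hb]
  exact Int.ediv_nonneg ha (le_of_lt hb)

-- the main run-counting invariant, for occurrences ≥ 2
theorem gA_eq_runs (occurrences : Int) (h2 : 2 ≤ occurrences) :
    ∀ (xs : List Int) (v found : Int), 0 ≤ found → found < occurrences →
      gA occurrences found v xs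
        = List.replicate (PySem.Int.floordiv (found + (countRun v xs).1) occurrences).toNat v
            ++ altLoop occurrences (countRun v xs).2 := by
  intro xs
  induction xs with
  | nil =>
    intro v found h0 h1
    simp [gA, countRun, altLoop, fdiv_small found occurrences h0 h1]
  | cons x xs ih =>
    intro v found h0 h1
    by_cases hx : x = v
    · subst hx
      rw [countRun_cons_self]
      have hc := countRun_nonneg x xs
      by_cases hf : found + 1 = occurrences
      · simp only [gA, if_pos rfl, if_pos hf]
        rw [ih x 0 le_rfl (by omega)]
        have he : found + ((countRun x xs).1 + 1) = occurrences + (countRun x xs).1 := by omega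
        rw [he, fdiv_add_self _ _ hc (by omega)]
        have hd := fdiv_nonneg' (countRun x xs).1 occurrences hc (by omega)
        have ht : (1 + PySem.Int.floordiv (countRun x xs).1 occurrences).toNat
            = (PySem.Int.floordiv (countRun x xs).1 occurrences).toNat + 1 := by omega
        rw [ht, List.replicate_succ]
        simp
      · have hflt : found + 1 < occurrences := by omega
        simp only [gA, if_pos rfl, if_neg hf]
        rw [ih x (found + 1) (by omega) hflt]
        have he : found + 1 + (countRun x xs).1 = found + ((countRun x xs).1 + 1) := by ring
        rw [he]
        simp
    · rw [countRun_cons_ne v x xs hx]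
      simp only [gA, if_neg hx]
      rw [ih x 1 (by omega) (by omega)]
      have he : found + 0 = found := by ring
      rw [he, fdiv_small found occurrences h0 h1]
      rw [show altLoop occurrences (x :: xs)
            = List.replicate (PySem.Int.floordiv ((countRun x xs).1 + 1) occurrences).toNat x
                ++ altLoop occurrences (countRun x xs).2 from by rw [altLoop]]
      have he2 : (1 : Int) + (countRun x xs).1 = (countRun x xs).1 + 1 := by ring
      rw [he2]
      simp

theorem gA_nil_of_nonpos (occurrences : Int) (hocc : occurrences ≤ 0) :
    ∀ (xs : List Int) (v found : Int), 0 ≤ found → gA occurrences found v xs = [] := by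
  intro xs
  induction xs with
  | nil => intro v found _; simp [gA]
  | cons d xs ih =>
    intro v found hf
    by_cases hd : d = v
    · have : ¬ (found + 1 = occurrences) := by omega
      simp only [gA, hd, if_pos rfl, if_neg this]
      exact ih v (found + 1) (by omega)
    · simp only [gA, hd, if_neg hd]
      exact ih d 1 (by omega)

theorem altLoop_nil_of_neg (occurrences : Int) (hocc : occurrences ≤ -1) :
    ∀ (xs : List Int), altLoop occurrences xs = [] := by
  intro xs
  induction hn : xs.length using Nat.strong_induction_on generalizing xs with
  | _ n ih =>
    cases xs with
    | nil => simp [altLoop]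
    | cons v rest0 =>
      rw [altLoop]
      have hc := countRun_nonneg v rest0
      rw [fdiv_neg_toNat _ _ (by omega) hocc]
      have hlen : (countRun v rest0).2.length < n := by
        have := countRun_len_le v rest0; subst hn; simp; omega
      simpa using ih _ hlen _ rfl

-- occurrences = 1 lemmas (the D_ region and the uniform-list case)
theorem gA_one_pos : ∀ (xs : List Int) (v found : Int), 1 ≤ found → gA 1 found v xs = [] := by
  intro xs
  induction xs with
  | nil => intro v found _; simp [gA]
  | cons d xs ih =>
    intro v found hf
    by_cases hd : d = v
    · have hne : ¬ (found + 1 = (1 : Int)) := by omega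
      simp only [gA, hd, if_pos rfl, if_neg hne]
      exact ih v (found + 1) (by omega)
    · simp only [gA, if_neg hd]
      exact ih d 1 le_rfl

theorem gA_one_zero : ∀ (xs : List Int) (v : Int),
    gA 1 0 v xs = List.replicate (countRun v xs).1.toNat v := by
  intro xs
  induction xs with
  | nil => intro v; simp [gA, countRun]
  | cons x xs ih =>
    intro v
    by_cases hx : x = v
    · subst hx
      rw [countRun_cons_self]
      have h01 : ((0 : Int) + 1 = 1) := by norm_num
      simp only [gA, if_pos rfl, if_pos h01]
      rw [ih x]
      have hc := countRun_nonneg x xs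
      have ht : ((countRun x xs).1 + 1).toNat = (countRun x xs).1.toNat + 1 := by omega
      rw [ht, List.replicate_succ]
      simp
    · rw [countRun_cons_ne v x xs hx]
      simp only [gA, if_neg hx]
      rw [gA_one_pos xs x 1 le_rfl]
      simp

theorem altLoop_one (xs : List Int) : altLoop 1 xs = xs := by
  induction hn : xs.length using Nat.strong_induction_on generalizing xs with
  | _ n ih =>
    cases xs with
    | nil => simp [altLoop]
    | cons v rest0 =>
      rw [altLoop]
      have hc := countRun_nonneg v rest0
      have hfd : PySem.Int.floordiv ((countRun v rest0).1 + 1) 1 = (countRun v rest0).1 + 1 := by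
        rw [PySem.Int.floordiv_eq_ediv_of_pos (by norm_num)]
        simp
      simp only [hfd]
      have hlen : (countRun v rest0).2.length < n := by
        have := countRun_len_le v rest0; subst hn; simp; omega
      rw [ih _ hlen _ rfl]
      have ht : ((countRun v rest0).1 + 1).toNat = (countRun v rest0).1.toNat + 1 := by omega
      rw [ht, List.replicate_succ]
      simpa using countRun_decomp v rest0

theorem foldl_rle (xs : List Int) : ∀ (rs : List (Int × Int)) (v c : Int),
    List.foldl rleStep (rs ++ [(v, c)]) xs
      = rs ++ (v, c + (countRun v xs).1) :: runsOf (countRun v xs).2 := by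
  induction xs with
  | nil => intro rs v c; simp [countRun, runsOf]
  | cons x xs ih =>
    intro rs v c
    have hstep : rleStep (rs ++ [(v, c)]) x
        = if v = x then rs ++ [(v, c + 1)] else (rs ++ [(v, c)]) ++ [(x, 1)] := by
      simp [rleStep]
    by_cases hx : x = v
    · subst hx
      rw [List.foldl_cons, hstep, if_pos rfl, ih rs x (c + 1), countRun_cons_self]
      have he : x = x ∧ c + 1 + (countRun x xs).1 = c + ((countRun x xs).1 + 1) := ⟨rfl, by ring⟩
      rw [he.2]
    · rw [List.foldl_cons, hstep, if_neg (fun h => hx h.symm),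
          ih (rs ++ [(v, c)]) x 1, countRun_cons_ne v x xs hx]
      rw [show runsOf (x :: xs) = (x, (countRun x xs).1 + 1) :: runsOf (countRun x xs).2 from by
            rw [runsOf]]
      have he : (1 : Int) + (countRun x xs).1 = (countRun x xs).1 + 1 := by ring
      simp [he]

theorem foldl_append_emit (occurrences : Int) : ∀ (rs : List (Int × Int)) (acc : List Int),
    rs.foldl (fun a p => a ++ List.replicate (PySem.Int.floordiv p.2 occurrences).toNat p.1) acc
      = acc ++ rs.flatMap (fun p => List.replicate (PySem.Int.floordiv p.2 occurrences).toNat p.1) := by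
  intro rs
  induction rs with
  | nil => intro acc; simp
  | cons p rs ih => intro acc; simp [ih]

theorem flatMap_runsOf (occurrences : Int) (xs : List Int) :
    (runsOf xs).flatMap (fun p => List.replicate (PySem.Int.floordiv p.2 occurrences).toNat p.1)
      = altLoop occurrences xs := by
  induction hn : xs.length using Nat.strong_induction_on generalizing xs with
  | _ n ih =>
    cases xs with
    | nil => simp [runsOf, altLoop]
    | cons v rest0 =>
      rw [show runsOf (v :: rest0) = (v, (countRun v rest0).1 + 1) :: runsOf (countRun v rest0).2
            from by rw [runsOf], altLoop]
      have hlen : (countRun v rest0).2.length < n := by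
        have := countRun_len_le v rest0; subst hn; simp; omega
      simp only [List.flatMap_cons]
      rw [ih _ hlen _ rfl]

theorem alt_eq (numList : List Int) (occurrences : Int) :
    lookForRepeated_alt numList occurrences = altLoop occurrences numList := by
  cases numList with
  | nil => simp [lookForRepeated_alt, altLoop]
  | cons a0 rest =>
    unfold lookForRepeated_alt
    have h1 := foldl_rle rest [] a0 1
    have h0 : List.foldl rleStep [] (a0 :: rest) = runsOf (a0 :: rest) := by
      rw [List.foldl_cons, show rleStep [] a0 = [(a0, 1)] from by simp [rleStep]]
      rw [show runsOf (a0 :: rest)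
            = (a0, (countRun a0 rest).1 + 1) :: runsOf (countRun a0 rest).2 from by rw [runsOf]]
      simpa [add_comm] using h1
    rw [h0, foldl_append_emit, flatMap_runsOf]
    simp

-- ===== VERDICT (by name: the statement is the Claim_ definition above) =====
theorem lookForRepeated_spec : Claim_unchanged_lookForRepeated := by
  intro numList occurrences _ hPre hD
  obtain ⟨hne, hocc⟩ := hPre
  cases numList with
  | nil => exact absurd rfl hne
  | cons a0 rest =>
    show lookForRepeated (a0 :: rest) occurrences = lookForRepeated_alt (a0 :: rest) occurrences
    rw [alt_eq]
    simp only [lookForRepeated]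
    rw [foldA_eq_gA, List.nil_append]
    by_cases h2 : 2 ≤ occurrences
    · rw [gA_eq_runs occurrences h2 (a0 :: rest) a0 0 le_rfl (by omega)]
      rw [countRun_cons_self]
      rw [show altLoop occurrences (a0 :: rest)
            = List.replicate (PySem.Int.floordiv ((countRun a0 rest).1 + 1) occurrences).toNat a0
                ++ altLoop occurrences (countRun a0 rest).2 from by rw [altLoop]]
      simp
    · by_cases h1 : occurrences = 1
      · subst h1
        rw [altLoop_one, gA_one_zero]
        have hall : ∀ x ∈ (a0 :: rest), x = a0 := by
          intro x hx
          by_contra hne'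
          exact hD ⟨rfl, ⟨x, hx, by simpa using hne'⟩⟩
        have hdec := countRun_decomp a0 (a0 :: rest)
        rcases countRun_head_ne a0 (a0 :: rest) with hnil | ⟨h, t, heq, hneq⟩
        · rw [hnil] at hdec; simpa using hdec
        · exfalso
          apply hneq
          apply hall
          exact countRun_mem a0 _ h (by rw [heq]; simp)
      · have hneg : occurrences ≤ -1 := by omega
        rw [altLoop_nil_of_neg occurrences hneg, gA_nil_of_nonpos occurrences (by omega) _ a0 0 le_rfl]

theorem lookForRepeated_changed : Claim_changed_lookForRepeated := by
  unfold Claim_changed_lookForRepeated; decide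

theorem lookForRepeated_tight : Claim_exact_lookForRepeated := by
  intro numList occurrences _ hPre hD heq
  obtain ⟨h1, x, hx, hxne⟩ := hD
  subst h1
  cases numList with
  | nil => simp at hx
  | cons a0 rest =>
    have hA : lookForRepeated (a0 :: rest) 1 = List.replicate (countRun a0 (a0 :: rest)).1.toNat a0 := by
      simp only [lookForRepeated]
      rw [foldA_eq_gA, List.nil_append, gA_one_zero]
    have hB : lookForRepeated_alt (a0 :: rest) 1 = a0 :: rest := by
      rw [alt_eq]; exact altLoop_one _
    rw [hA, hB] at heq
    have hx' : x ∈ List.replicate (countRun a0 (a0 :: rest)).1.toNat a0 := by rw [heq]; exact hx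
    have hxa := List.eq_of_mem_replicate hx'
    simp only [List.headD] at hxne
    exact hxne hxa
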